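-- pv_equiv track=rewrite | github.com/grtninja/skill-arbiter | scripts/arbitrate_skills.py | has_persistent_nonzero
-- ===== SOURCE A (Python) =====
-- from typing import Iterable
--
-- def has_persistent_nonzero(samples: Iterable[int], threshold_s: int) -> bool:
--     """Return True when nonzero samples persist for threshold duration."""
--
--     streak = 0
--     for value in samples:
--         if value > 0:
--             streak += 1
--             if streak >= threshold_s:
--                 return True
--         else:
--             streak = 0
--     return False
-- ===== SOURCE B (Python) =====
-- def has_persistent_nonzero(samples, threshold_s):
--     """Return True when nonzero samples persist for threshold duration."""
--     xs = list(samples)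
--     w = max(threshold_s, 1)
--     pre = [0]
--     total = 0
--     for v in xs:
--         total += 1 if v > 0 else 0
--         pre.append(total)
--     return any(pre[i + w] - pre[i] == w for i in range(len(xs) - w + 1))
-- ===== Notes on version B (the rewrite author's own statement) =====
-- stated objective: alternative
-- what changed: Replaced the streak counter with a prefix-count sliding window: build a prefix array of positive-sample counts, then a window of length max(threshold_s,1) is all-positive iff the prefix counts at its ends differ by the window length.
import Mathlib
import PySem

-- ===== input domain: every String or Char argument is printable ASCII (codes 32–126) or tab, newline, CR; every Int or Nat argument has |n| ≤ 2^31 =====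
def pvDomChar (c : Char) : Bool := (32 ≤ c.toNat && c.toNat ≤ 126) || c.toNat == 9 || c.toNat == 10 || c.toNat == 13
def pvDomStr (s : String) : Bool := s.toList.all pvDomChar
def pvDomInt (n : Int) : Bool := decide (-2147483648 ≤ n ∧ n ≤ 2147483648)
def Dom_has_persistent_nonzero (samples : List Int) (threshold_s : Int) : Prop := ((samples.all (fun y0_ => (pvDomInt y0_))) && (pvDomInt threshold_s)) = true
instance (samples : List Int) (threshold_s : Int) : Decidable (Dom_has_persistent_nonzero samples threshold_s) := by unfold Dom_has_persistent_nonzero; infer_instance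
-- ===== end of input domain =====

-- B replaces A's streak counter with a prefix-count sliding window: a window of
-- max(threshold_s,1) samples is all-positive iff its end prefix counts differ by
-- the window length (alternative decomposition; same return value).

-- ===== PORT A =====
-- the 'for value in samples' loop with its 'streak' accumulator and early return
def pvLoopA (t : Int) : List Int → Int → Bool
  | [], _ => false
  | v :: rest, streak =>
    if v > 0 then
      if streak + 1 ≥ t then true else pvLoopA t rest (streak + 1)
    else pvLoopA t rest 0

def has_persistent_nonzero (samples : List Int) (threshold_s : Int) : Bool :=
  pvLoopA threshold_s samples 0

-- ===== PORT B =====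
-- xs = list(samples); w = max(threshold_s, 1); pre = running prefix counts of
-- positive samples; any(pre[i+w] - pre[i] == w for i in range(len(xs) - w + 1))
def has_persistent_nonzero_alt (samples : List Int) (threshold_s : Int) : Bool :=
  let w : Int := max threshold_s 1
  let st := samples.foldl (fun (pr : List Int × Int) v =>
      let total := pr.2 + (if v > 0 then 1 else 0)
      (pr.1 ++ [total], total)) ([0], 0)
  let pre := st.1
  (PySem.List.pyRange 0 ((samples.length : Int) - w + 1) 1).any
    (fun i => decide (PySem.List.pyGetD pre (i + w) 0 - PySem.List.pyGetD pre i 0 = w))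

-- ===== PRECONDITION & SPEC =====
def Spec_has_persistent_nonzero (samples : List Int) (threshold_s : Int) (out : Bool) : Prop := out = has_persistent_nonzero_alt samples threshold_s
instance (samples : List Int) (threshold_s : Int) (out : Bool) : Decidable (Spec_has_persistent_nonzero samples threshold_s out) := by unfold Spec_has_persistent_nonzero; infer_instance

-- ===== CLAIM (what is proved, stated in full; the proofs are below) =====
def Claim_equal_has_persistent_nonzero : Prop := ∀ (samples : List Int) (threshold_s : Int), Dom_has_persistent_nonzero samples threshold_s → Spec_has_persistent_nonzero samples threshold_s (has_persistent_nonzero samples threshold_s)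

-- ===== LEMMAS AND PROOFS =====

-- "some window of length wN whose elements all satisfy p exists"
def pvWin (p : Int → Bool) (wN : Nat) (xs : List Int) : Prop :=
  ∃ i : Nat, i + wN ≤ xs.length ∧ ((xs.drop i).take wN).all p = true

def pvE (wN : Nat) (xs : List Int) : Prop := pvWin (fun v => decide (v > 0)) wN xs

-- the prefix-count foldl from an arbitrary start state
theorem preFold (xs : List Int) : ∀ (pre0 : List Int) (r0 : Int),
    xs.foldl (fun (pr : List Int × Int) v =>
        let total := pr.2 + (if v > 0 then 1 else 0)
        (pr.1 ++ [total], total)) (pre0, r0) =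
      (pre0 ++ (List.range xs.length).map
          (fun k => r0 + ((xs.take (k + 1)).countP (fun v => decide (v > 0)) : Int)),
       r0 + (xs.countP (fun v => decide (v > 0)) : Int)) := by
  induction xs with
  | nil => intro pre0 r0; simp
  | cons x rest ih =>
    intro pre0 r0
    rw [List.foldl_cons]
    simp only []
    rw [ih (pre0 ++ [r0 + (if x > 0 then 1 else 0)]) (r0 + (if x > 0 then 1 else 0))]
    rw [Prod.mk.injEq]
    refine ⟨?_, ?_⟩
    · rw [List.length_cons, List.range_succ_eq_map, List.map_cons, List.map_map,
          List.append_assoc]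
      congr 1
      rw [List.singleton_append]
      congr 1
      · by_cases hx : x > 0 <;> simp [hx]
      · apply List.map_congr_left
        intro k _
        simp only [Function.comp, List.take_succ_cons, List.countP_cons]
        by_cases hx : x > 0 <;> simp [hx] <;> ring
    · simp only [List.countP_cons]
      by_cases hx : x > 0 <;> simp [hx] <;> ring

-- the pre list is exactly the prefix counts, indexed over range (n+1)
theorem pre_eq (xs : List Int) :
    (xs.foldl (fun (pr : List Int × Int) v =>
        let total := pr.2 + (if v > 0 then 1 else 0)
        (pr.1 ++ [total], total)) (([0], 0) : List Int × Int)).1 =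
      (List.range (xs.length + 1)).map
        (fun k => ((xs.take k).countP (fun v => decide (v > 0)) : Int)) := by
  rw [preFold xs [0] 0]
  rw [List.range_succ_eq_map, List.map_cons, List.map_map]
  simp only [List.take_zero, List.countP_nil, Nat.cast_zero]
  rw [List.singleton_append]
  congr 1
  apply List.map_congr_left
  intro k _
  simp [Function.comp]

-- a window is all-positive iff its positive count equals its length
theorem count_window (xs : List Int) (i wN : Nat) (h : i + wN ≤ xs.length) :
    (((xs.take (i + wN)).countP (fun v => decide (v > 0)) : Int) -
       ((xs.take i).countP (fun v => decide (v > 0)) : Int) = (wN : Int)) ↔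
      ((xs.drop i).take wN).all (fun v => decide (v > 0)) = true := by
  have hsplit : xs.take (i + wN) = xs.take i ++ (xs.drop i).take wN := List.take_add
  have hlen : ((xs.drop i).take wN).length = wN := by
    simp
    omega
  rw [hsplit, List.countP_append]
  have hcle : ((xs.drop i).take wN).countP (fun v => decide (v > 0)) ≤ wN := by
    calc _ ≤ ((xs.drop i).take wN).length := List.countP_le_length
      _ = wN := hlen
  constructor
  · intro hsum
    have : ((xs.drop i).take wN).countP (fun v => decide (v > 0)) = wN := by omega
    rw [List.all_eq_true]
    intro a ha
    have := (List.countP_eq_length).mp (by rw [this, hlen])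
    exact this a ha
  · intro hall
    have : ((xs.drop i).take wN).countP (fun v => decide (v > 0)) =
        ((xs.drop i).take wN).length :=
      List.countP_eq_length.mpr (fun a ha => List.all_eq_true.mp hall a ha)
    rw [this, hlen]
    push_cast
    ring

-- B computes exactly pvE with wN = (max t 1).toNat
theorem altB_iff (xs : List Int) (t : Int) :
    has_persistent_nonzero_alt xs t = true ↔ pvE (max t 1).toNat xs := by
  have hw1 : (1 : Int) ≤ max t 1 := le_max_right t 1
  have hwcast : (((max t 1).toNat : Int)) = max t 1 := Int.toNat_of_nonneg (by omega)
  unfold has_persistent_nonzero_alt pvE pvWin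
  simp only [pre_eq]
  simp only [List.any_eq_true, PySem.List.mem_pyRange_one]
  have hget : ∀ k : Nat, k < xs.length + 1 →
      PySem.List.pyGetD ((List.range (xs.length + 1)).map
        (fun k => ((xs.take k).countP (fun v => decide (v > 0)) : Int))) (k : Int) 0 =
      ((xs.take k).countP (fun v => decide (v > 0)) : Int) := by
    intro k hk
    rw [PySem.List.pyGetD_natCast]
    exact PySem.List.getD_map_range _ _ _ _ hk
  constructor
  · rintro ⟨i, ⟨h0, h1⟩, hdec⟩
    have hiw : i.toNat + (max t 1).toNat ≤ xs.length := by omega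
    refine ⟨i.toNat, hiw, ?_⟩
    rw [show i + max t 1 = ((i.toNat + (max t 1).toNat : Nat) : Int) by push_cast; omega,
        show i = ((i.toNat : Nat) : Int) by omega] at hdec
    rw [hget _ (by omega), hget _ (by omega)] at hdec
    have hval := of_decide_eq_true hdec
    rw [← count_window xs i.toNat (max t 1).toNat hiw, hwcast]
    exact hval
  · rintro ⟨i, hle, hall⟩
    refine ⟨(i : Int), ⟨by omega, by omega⟩, ?_⟩
    rw [show (i : Int) + max t 1 = ((i + (max t 1).toNat : Nat) : Int) by push_cast; omega]
    rw [hget _ (by omega), hget _ (by omega)]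
    apply decide_eq_true
    have hval := (count_window xs i (max t 1).toNat hle).mpr hall
    rw [hwcast] at hval
    exact hval

theorem pvWin_cons_false {p : Int → Bool} {x : Int} (hx : p x = false) {wN : Nat}
    (hw : 1 ≤ wN) (rest : List Int) :
    pvWin p wN (x :: rest) ↔ pvWin p wN rest := by
  constructor
  · rintro ⟨i, hle, hall⟩
    match i with
    | 0 =>
      exfalso
      obtain ⟨k, rfl⟩ : ∃ k, wN = k + 1 := ⟨wN - 1, by omega⟩
      simp [List.take_succ_cons, List.all_cons, hx] at hall
    | j + 1 =>
      refine ⟨j, by simp at hle; omega, by simpa using hall⟩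
  · rintro ⟨i, hle, hall⟩
    exact ⟨i + 1, by simp; omega, by simpa using hall⟩

-- splitting pvWin at the leading run of p-elements
theorem pvWin_split (p : Int → Bool) (xs : List Int) {wN : Nat} (hw : 1 ≤ wN) :
    pvWin p wN xs ↔ (wN ≤ (xs.takeWhile p).length ∨ pvWin p wN (xs.dropWhile p)) := by
  have hsplit : xs = xs.takeWhile p ++ xs.dropWhile p := (List.takeWhile_append_dropWhile).symm
  set L := (xs.takeWhile p).length with hL
  have hlen : xs.length = L + (xs.dropWhile p).length := by
    rw [hL]
    conv_lhs => rw [hsplit]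
    rw [List.length_append]
  have hdropL : ∀ i : Nat, L ≤ i → xs.drop i = (xs.dropWhile p).drop (i - L) := by
    intro i hi
    conv_lhs => rw [hsplit]
    rw [List.drop_append, List.drop_eq_nil_of_le (by omega), List.nil_append]
  constructor
  · rintro ⟨i, hle, hall⟩
    by_cases hcase : L ≤ i
    · right
      exact ⟨i - L, by omega, by rwa [hdropL i hcase] at hall⟩
    · push Not at hcase
      by_cases hfit : i + wN ≤ L
      · left; omega
      · exfalso
        push Not at hfit
        -- the window contains index L, whose element fails p
        have hLn : L < xs.length := by omega
        have hdw : xs.dropWhile p ≠ [] := by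
          intro hnil; rw [hnil] at hlen; simp at hlen; omega
        have hget : xs[L] = (xs.dropWhile p).head hdw := by
          have hdrop : xs.drop L = xs.dropWhile p := by
            rw [hdropL L le_rfl]; simp
          have h0 : xs[L] = (xs.drop L)[0]'(by simp; omega) := by simp
          rw [h0]
          simp only [hdrop]
          exact List.getElem_zero _
        have hnp : p xs[L] = false := by
          rw [hget]; exact List.head_dropWhile_not p hdw
        have hmem : xs[L] ∈ (xs.drop i).take wN := by
          have h1 : ((xs.drop i).take wN)[L - i]'(by simp; omega) = xs[L] := by
            rw [List.getElem_take, List.getElem_drop]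
            congr 1
            omega
          rw [← h1]
          exact List.getElem_mem _
        have := List.all_eq_true.mp hall _ hmem
        rw [hnp] at this
        exact Bool.false_ne_true this
  · rintro h
    cases h with
    | inl h =>
      refine ⟨0, by omega, ?_⟩
      have htk : xs.take wN = (xs.takeWhile p).take wN := by
        conv_lhs => rw [hsplit]
        rw [List.take_append, show wN - (xs.takeWhile p).length = 0 by omega]
        simp
      rw [List.drop_zero, htk]
      refine List.all_eq_true.mpr ?_
      intro a ha
      exact List.mem_takeWhile_imp (List.mem_of_mem_take ha)
    | inr h =>
      obtain ⟨i, hle, hall⟩ := h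
      refine ⟨L + i, by omega, ?_⟩
      rwa [hdropL (L + i) (by omega), show L + i - L = i by omega]

-- A's loop over one maximal positive run (from the streak accumulator's view)
theorem pvLoopA_run (t : Int) (xs : List Int) : ∀ s : Int,
    pvLoopA t xs s =
      ((decide (1 ≤ (xs.takeWhile (fun v => decide (v > 0))).length ∧
         s + ((xs.takeWhile (fun v => decide (v > 0))).length : Int) ≥ t)) ||
       pvLoopA t (xs.dropWhile (fun v => decide (v > 0))) 0) := by
  induction xs with
  | nil => intro s; simp [pvLoopA]
  | cons x rest ih =>
    intro s
    by_cases hx : x > 0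
    · by_cases hst : s + 1 ≥ t
      · have h1 : (1:ℕ) ≤ ((x :: rest).takeWhile (fun v => decide (v > 0))).length := by
          simp [List.takeWhile, hx]
        simp [pvLoopA, hx, hst]
        left
        have h3 : (0:Int) ≤ ((rest.takeWhile (fun v => decide (0 < v))).length : Int) :=
          Int.natCast_nonneg _
        omega
      · rw [show pvLoopA t (x :: rest) s = pvLoopA t rest (s+1) by simp [pvLoopA, hx, hst]]
        rw [ih (s+1)]
        have e1 : (x :: rest).takeWhile (fun v => decide (v > 0)) =
            x :: rest.takeWhile (fun v => decide (v > 0)) := by simp [List.takeWhile, hx]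
        have e2 : (x :: rest).dropWhile (fun v => decide (v > 0)) =
            rest.dropWhile (fun v => decide (v > 0)) := by simp [List.dropWhile, hx]
        rw [e1, e2]
        simp only [List.length_cons]
        congr 1
        rw [decide_eq_decide]
        push_cast
        simp only [true_and]
        omega
    · simp [pvLoopA, hx, List.takeWhile, List.dropWhile]

theorem pvLoopA_iff_pvE (t : Int) : ∀ n (xs : List Int), xs.length ≤ n →
    (pvLoopA t xs 0 = true ↔ pvE (max t 1).toNat xs) := by
  have hw1 : 1 ≤ (max t 1).toNat := by omega
  intro n
  induction n with
  | zero =>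
    intro xs h
    have hnil : xs = [] := List.eq_nil_of_length_eq_zero (Nat.le_zero.mp h)
    subst hnil
    have hne : ¬ pvE (max t 1).toNat [] := by
      rintro ⟨i, hle, -⟩; simp only [List.length_nil] at hle; omega
    simp [pvLoopA, hne]
  | succ n ih =>
    intro xs h
    match xs with
    | [] =>
      have hne : ¬ pvE (max t 1).toNat [] := by
        rintro ⟨i, hle, -⟩; simp only [List.length_nil] at hle; omega
      simp [pvLoopA, hne]
    | x :: rest =>
      by_cases hx : x > 0
      · rw [pvLoopA_run t (x :: rest) 0]
        set L := ((x :: rest).takeWhile (fun v => decide (v > 0))).length with hL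
        have e2 : (x :: rest).dropWhile (fun v => decide (v > 0)) =
            rest.dropWhile (fun v => decide (v > 0)) := by simp [List.dropWhile, hx]
        have hih := ih (rest.dropWhile (fun v => decide (v > 0)))
          (le_trans (List.length_dropWhile_le _ _) (Nat.le_of_succ_le_succ h))
        rw [show pvE (max t 1).toNat (x :: rest) = pvWin (fun v => decide (v > 0)) (max t 1).toNat (x :: rest) from rfl,
            pvWin_split _ (x :: rest) hw1, ← hL, e2]
        have hL1 : 1 ≤ L := by simp [hL, List.takeWhile, hx]
        have hwcast : (((max t 1).toNat : Int)) = max t 1 := Int.toNat_of_nonneg (by omega)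
        constructor
        · intro hor
          rcases Bool.or_eq_true_iff.mp hor with hd | hrec
          · left
            have := of_decide_eq_true hd
            omega
          · right; exact hih.mp hrec
        · intro hor
          apply Bool.or_eq_true_iff.mpr
          rcases hor with hd | hrec
          · left
            apply decide_eq_true
            constructor
            · omega
            · omega
          · right; exact hih.mpr hrec
      · rw [show pvLoopA t (x :: rest) 0 = pvLoopA t rest 0 by simp [pvLoopA, hx]]
        rw [show pvE (max t 1).toNat (x :: rest) = pvWin (fun v => decide (v > 0)) (max t 1).toNat (x :: rest) from rfl,
            pvWin_cons_false (decide_eq_false hx) hw1 rest]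
        exact ih rest (Nat.le_of_succ_le_succ h)

-- ===== VERDICT (by name: the statement is the Claim_ definition above) =====
theorem has_persistent_nonzero_spec : Claim_equal_has_persistent_nonzero := by
  intro samples threshold_s _
  unfold Spec_has_persistent_nonzero has_persistent_nonzero
  rw [Bool.eq_iff_iff]
  rw [pvLoopA_iff_pvE threshold_s samples.length samples le_rfl]
  exact (altB_iff samples threshold_s).symm
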